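-- pv_equiv track=rewrite | github.com/monizyzz/University | 2-year/Algorithmic Laboratory II/tournament1/hindex.py | setCit
-- ===== SOURCE A (Python) =====
-- def setCit(papers,listaAut):
--     r = {}
--     for aut in listaAut:
--         l = []
--         for auths, name, cit in papers:
--             for auth in auths:
--                 if aut == auth:
--                     l.append(cit)
--         r[aut] = l
--     return r
-- ===== SOURCE B (Python) =====
-- def setCit(papers, listaAut):
--     idx = {}
--     for auths, _name, cit in papers:
--         for auth in auths:
--             idx.setdefault(auth, []).append(cit)
--     return {aut: idx.get(aut, []) for aut in listaAut}
-- ===== Notes on version B (the rewrite author's own statement) =====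
-- stated objective: faster
-- what changed: One pass over papers building a dict author->citations, then one lookup per requested author, instead of rescanning every paper's author list for each author.
import Mathlib
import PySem

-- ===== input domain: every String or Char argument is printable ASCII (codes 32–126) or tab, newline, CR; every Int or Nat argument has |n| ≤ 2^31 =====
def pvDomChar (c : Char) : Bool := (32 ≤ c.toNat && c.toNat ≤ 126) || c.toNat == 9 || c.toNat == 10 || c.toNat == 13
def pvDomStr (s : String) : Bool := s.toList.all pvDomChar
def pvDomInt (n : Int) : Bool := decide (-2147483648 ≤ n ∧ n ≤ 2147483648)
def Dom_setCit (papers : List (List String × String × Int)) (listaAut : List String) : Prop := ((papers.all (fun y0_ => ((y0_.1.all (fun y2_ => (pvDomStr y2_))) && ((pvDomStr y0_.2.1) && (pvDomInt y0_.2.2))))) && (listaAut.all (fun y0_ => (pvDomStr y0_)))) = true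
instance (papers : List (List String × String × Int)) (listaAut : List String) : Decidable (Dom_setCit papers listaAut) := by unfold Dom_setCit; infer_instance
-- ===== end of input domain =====

-- B replaces A's author-by-author rescans of all papers with one indexing pass over the
-- papers and a single dict lookup per author (faster: asymptotic, O(A*P*K) -> O(P*K + A)).

-- ===== PORT A =====
-- for each aut: scan every paper, scan its author list, collect cit on each match
def setCit (papers : List (List String × String × Int)) (listaAut : List String) : List (String × List Int) :=
  (listaAut.foldl (fun r aut =>
      r.insert aut (papers.foldl (fun l p =>
        p.1.foldl (fun l auth => if aut == auth then l ++ [p.2.2] else l) l) [])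
    ) PySem.Dict.empty).items

-- ===== PORT B =====
-- one pass over papers building idx : author -> citations, then one lookup per aut
def setCit_alt (papers : List (List String × String × Int)) (listaAut : List String) : List (String × List Int) :=
  let idx : PySem.Dict String (List Int) :=
    papers.foldl (fun d p =>
      p.1.foldl (fun d auth => d.modify auth [] (· ++ [p.2.2])) d) PySem.Dict.empty
  (listaAut.foldl (fun r aut => r.insert aut (idx.getD aut [])) PySem.Dict.empty).items

-- ===== PRECONDITION & SPEC =====
def Spec_setCit (papers : List (List String × String × Int)) (listaAut : List String) (out : List (String × List Int)) : Prop := out = setCit_alt papers listaAut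
instance (papers : List (List String × String × Int)) (listaAut : List String) (out : List (String × List Int)) : Decidable (Spec_setCit papers listaAut out) := by unfold Spec_setCit; infer_instance

-- ===== CLAIM (what is proved, stated in full; the proofs are below) =====
def Claim_equal_setCit : Prop := ∀ (papers : List (List String × String × Int)) (listaAut : List String), Dom_setCit papers listaAut → Spec_setCit papers listaAut (setCit papers listaAut)

-- ===== LEMMAS AND PROOFS =====

-- one paper: the index fold over its author list, read back at a, matches A's inner fold
theorem setCit_idx_inner (auths : List String) (c : Int)
    (d : PySem.Dict String (List Int)) (a : String) :
    (auths.foldl (fun d auth => d.modify auth [] (· ++ [c])) d).getD a []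
      = auths.foldl (fun l auth => if a == auth then l ++ [c] else l) (d.getD a []) := by
  induction auths generalizing d with
  | nil => rfl
  | cons auth rest ih =>
    simp only [List.foldl_cons, ih, PySem.Dict.getD_modify]
    by_cases h : a = auth <;> simp [h]

-- whole index build: reading idx at a gives exactly A's scan over all papers
theorem setCit_idx (papers : List (List String × String × Int))
    (d : PySem.Dict String (List Int)) (a : String) :
    (papers.foldl (fun d p =>
        p.1.foldl (fun d auth => d.modify auth [] (· ++ [p.2.2])) d) d).getD a []
      = papers.foldl (fun l p =>
          p.1.foldl (fun l auth => if a == auth then l ++ [p.2.2] else l) l) (d.getD a []) := by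
  induction papers generalizing d with
  | nil => rfl
  | cons p rest ih =>
    simp only [List.foldl_cons, ih, setCit_idx_inner]

-- ===== VERDICT (by name: the statement is the Claim_ definition above) =====
theorem setCit_spec : Claim_equal_setCit := by
  intro papers listaAut _
  show setCit papers listaAut = setCit_alt papers listaAut
  unfold setCit setCit_alt
  congr 2
  funext r aut
  rw [setCit_idx, PySem.Dict.getD_empty]
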